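-- pv_equiv track=rewrite | github.com/Viva-La-Vida2020/mwps_code_wrap | src/metrics/metrics_inference.py | from_prefix_to_infix
-- ===== SOURCE A (Python) =====
-- def from_prefix_to_infix(prefix):
--     """
--     Convert a prefix expression to an infix expression without adding parentheses around numbers.
--
--     Args:
--         prefix (list): A list representing a prefix expression (e.g., ["+", "3", "4"]).
--
--     Returns:
--         str: The corresponding infix expression (e.g., "3 + 4").
--         None: If the prefix expression is invalid.
--     """
--     stack = []
--     operators = {"+", "-", "*", "/", "^"}  # Using set for faster lookup
--
--     for token in reversed(prefix):  # Reverse the prefix expression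
--         if token not in operators:
--             stack.append(str(token))  # Ensure token is a string for concatenation
--             continue
--
--         if len(stack) < 2:
--             return None  # Invalid expression
--
--         a, b = stack.pop(), stack.pop()
--
--         # Sort operands for commutative operations (+, *)
--         if token in {"+", "*"}:
--             a, b = sorted([a, b])
--
--         # Add parentheses only if operands are not numbers
--         a_wrap = f"({a})" if not a.replace('.', '', 1).isdigit() else a
--         b_wrap = f"({b})" if not b.replace('.', '', 1).isdigit() else b
--
--         expr = f"{a_wrap} {token} {b_wrap}"
--         stack.append(expr)
--
--     return stack[0] if len(stack) == 1 else None  # Ensure only one valid expression remains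
-- ===== SOURCE B (Python) =====
-- def from_prefix_to_infix(prefix):
--     """Recursive-descent parser over the prefix list (front-to-back), instead of
--     the reversed-list stack evaluation."""
--     ops = ("+", "-", "*", "/", "^")
--
--     def is_num(s):
--         return s.replace('.', '', 1).isdigit()
--
--     def wrap(s):
--         return s if is_num(s) else "(" + s + ")"
--
--     def parse(toks):
--         # parse one complete prefix expression from the front; return (expr, rest) or None
--         if not toks:
--             return None
--         tok, rest = str(toks[0]), toks[1:]
--         if tok not in ops:
--             return tok, rest
--         left = parse(rest)
--         if left is None:
--             return None
--         a, r1 = left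
--         right = parse(r1)
--         if right is None:
--             return None
--         b, r2 = right
--         if tok in ("+", "*") and b < a:
--             a, b = b, a
--         return wrap(a) + " " + tok + " " + wrap(b), r2
--
--     res = parse(prefix)
--     if res is None:
--         return None
--     expr, rest = res
--     return expr if not rest else None
-- ===== Notes on version B (the rewrite author's own statement) =====
-- stated objective: alternative
-- what changed: Replaces A's reversed-iteration stack evaluation with a recursive-descent parser that consumes one complete prefix expression from the front of the list and rejects the input when parsing underflows or tokens remain.
import Mathlib
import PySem

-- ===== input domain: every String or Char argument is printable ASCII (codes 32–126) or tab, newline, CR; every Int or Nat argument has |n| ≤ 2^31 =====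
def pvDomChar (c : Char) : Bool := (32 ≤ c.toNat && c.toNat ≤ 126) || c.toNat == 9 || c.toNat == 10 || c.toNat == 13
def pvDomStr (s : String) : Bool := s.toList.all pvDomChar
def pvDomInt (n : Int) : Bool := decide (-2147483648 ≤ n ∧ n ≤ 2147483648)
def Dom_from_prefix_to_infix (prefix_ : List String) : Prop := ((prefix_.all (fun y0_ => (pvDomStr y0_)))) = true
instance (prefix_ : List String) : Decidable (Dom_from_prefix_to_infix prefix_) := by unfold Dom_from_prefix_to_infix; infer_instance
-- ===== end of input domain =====

-- B replaces A's reversed-list stack evaluation by a recursive-descent parser that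
-- consumes the prefix list from the front (objective: alternative decomposition).


-- ===== PORT A =====

-- shared helper: s.replace('.', '', 1) — remove the FIRST '.' only (count = 1);
-- hand-written because PySem.Str.replace has no count parameter; exact on all inputs
def dropFirstDot : List Char → List Char
  | [] => []
  | c :: cs => if c = '.' then cs else c :: dropFirstDot cs

-- shared helper: "(s)" if not s.replace('.','',1).isdigit() else s
def wrapTok (s : String) : String :=
  if PySem.Chars.strIsdigit (dropFirstDot s.toList) then s else "(" ++ s ++ ")"

-- operators = {"+", "-", "*", "/", "^"}  (Python set)
def opSetA : PySem.Set String := PySem.Set.ofList ["+", "-", "*", "/", "^"]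

-- one iteration of A's loop body over the Option-valued stack (none = the early
-- 'return None'; head of the Lean list = top of the Python stack)
def stepA (os : Option (List String)) (token : String) : Option (List String) :=
  os.bind fun stack =>
    if ¬ (token ∈ opSetA) then
      some (token :: stack)        -- stack.append(str(token)): str() is identity on str
    else if stack.length < 2 then
      none                         -- return None
    else
      match stack with
      | a :: b :: rest =>
        -- a, b = stack.pop(), stack.pop(); sorted for commutative tokens
        let ab : List String :=
          if token = "+" ∨ token = "*" then PySem.List.sorted [a, b] (fun x => x) false
          else [a, b]
        let a' := ab.getD 0 a
        let b' := ab.getD 1 b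
        some ((wrapTok a' ++ " " ++ token ++ " " ++ wrapTok b') :: rest)
      | _ => none                  -- unreachable (length ≥ 2)

-- for token in reversed(prefix): …; return stack[0] if len(stack) == 1 else None
def from_prefix_to_infix (prefix_ : List String) : Option String :=
  match prefix_.reverse.foldl stepA (some []) with
  | some stack => if stack.length = 1 then PySem.List.pyGet? stack 0 else none
  | none => none

-- ===== PORT B =====

-- ops = ("+", "-", "*", "/", "^")  (tuple membership in Source B)
def isOpB (t : String) : Bool := t == "+" || t == "-" || t == "*" || t == "/" || t == "^"

-- parse one complete prefix expression from the front of the list, returning it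
-- together with the unconsumed rest; the Nat fuel only makes the recursion
-- structural (it is never exhausted when fuel ≥ length, see parseB_fuel below)
def parseB : Nat → List String → Option (String × List String)
  | _, [] => none
  | 0, _ :: _ => none
  | fuel + 1, tok :: rest =>
    if isOpB tok then
      match parseB fuel rest with
      | none => none
      | some (a, r1) =>
        match parseB fuel r1 with
        | none => none
        | some (b, r2) =>
          let (a', b') := if (tok == "+" || tok == "*") && decide (b < a) then (b, a) else (a, b)
          some (wrapTok a' ++ " " ++ tok ++ " " ++ wrapTok b', r2)
    else
      some (tok, rest)

def from_prefix_to_infix_alt (prefix_ : List String) : Option String :=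
  match parseB prefix_.length prefix_ with
  | none => none
  | some (expr, rest) => if rest.isEmpty then some expr else none

-- ===== PRECONDITION & SPEC =====
def Spec_from_prefix_to_infix (prefix_ : List String) (out : Option String) : Prop := out = from_prefix_to_infix_alt prefix_
instance (prefix_ : List String) (out : Option String) : Decidable (Spec_from_prefix_to_infix prefix_ out) := by unfold Spec_from_prefix_to_infix; infer_instance

-- ===== CLAIM (what is proved, stated in full; the proofs are below) =====
def Claim_equal_from_prefix_to_infix : Prop := ∀ (prefix_ : List String), Dom_from_prefix_to_infix prefix_ → Spec_from_prefix_to_infix prefix_ (from_prefix_to_infix prefix_)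

-- ===== LEMMAS AND PROOFS =====
theorem parseB_consumes : ∀ (f : Nat) (l : List String) (e : String) (r : List String),
    parseB f l = some (e, r) → r.length < l.length := by
  intro f
  induction f with
  | zero => intro l e r h; cases l <;> simp [parseB] at h
  | succ f ih =>
    intro l e r h
    cases l with
    | nil => simp [parseB] at h
    | cons t rest =>
      rw [parseB] at h
      by_cases hop : isOpB t
      · simp only [hop, if_true] at h
        cases h1 : parseB f rest with
        | none => rw [h1] at h; simp at h
        | some p =>
          obtain ⟨a, r1⟩ := p
          rw [h1] at h
          dsimp only at h
          cases h2 : parseB f r1 with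
          | none => rw [h2] at h; simp at h
          | some q =>
            obtain ⟨b, r2⟩ := q
            rw [h2] at h
            dsimp only at h
            simp at h
            have := ih rest a r1 h1
            have := ih r1 b r2 h2
            have : r2.length < rest.length := by omega
            simp [← h.2]
            omega
      · simp only [hop] at h
        simp at h
        simp [← h.2]

theorem parseB_fuel : ∀ (f g : Nat) (l : List String), l.length ≤ f → l.length ≤ g →
    parseB f l = parseB g l := by
  intro f
  induction f with
  | zero =>
    intro g l hf hg
    have hl : l = [] := by cases l <;> simp_all
    subst hl; cases g <;> rfl
  | succ f ih =>
    intro g l hf hg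
    cases l with
    | nil => cases g <;> rfl
    | cons t rest =>
      cases g with
      | zero => simp at hg
      | succ g =>
        rw [parseB, parseB]
        by_cases hop : isOpB t
        · simp only [hop, if_true]
          have hrest : parseB f rest = parseB g rest := by
            apply ih <;> simp at hf hg <;> omega
          rw [← hrest]
          cases h1 : parseB f rest with
          | none => rfl
          | some p =>
            obtain ⟨a, r1⟩ := p
            have hr1 : r1.length < rest.length := parseB_consumes f rest a r1 h1
            have : parseB f r1 = parseB g r1 := by
              apply ih; · simp at hf; omega
              · simp at hg; omega
            dsimp only
            rw [this]
        · simp [hop]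

def mkExpr (t a b : String) : String :=
  let (a', b') := if (t == "+" || t == "*") && decide (b < a) then (b, a) else (a, b)
  wrapTok a' ++ " " ++ t ++ " " ++ wrapTok b'

def P (l : List String) : Option (String × List String) := parseB l.length l

theorem P_cons (t : String) (r : List String) :
    P (t :: r) = if isOpB t then
        (P r).bind fun p => (P p.2).bind fun q =>
          some (mkExpr t p.1 q.1, q.2)
      else some (t, r) := by
  show parseB (r.length + 1) (t :: r) = _
  rw [parseB]
  by_cases hop : isOpB t
  · simp only [hop, if_true]
    show _ = (P r).bind _
    unfold P
    cases h1 : parseB r.length r with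
    | none => rfl
    | some p =>
      obtain ⟨a, r1⟩ := p
      dsimp only [Option.bind]
      have hr1 : r1.length < r.length := parseB_consumes _ _ _ _ h1
      have : parseB r.length r1 = parseB r1.length r1 := parseB_fuel _ _ _ (by omega) (by omega)
      rw [this]
      cases h2 : parseB r1.length r1 with
      | none => rfl
      | some q => obtain ⟨b, r2⟩ := q; rfl
  · simp [hop]

def seqF : Nat → List String → Option (List String)
  | _, [] => some []
  | 0, _ :: _ => none
  | f + 1, t :: r =>
    (parseB (f + 1) (t :: r)).bind fun p => (seqF f p.2).bind fun es => some (p.1 :: es)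

theorem seqF_fuel : ∀ (f g : Nat) (l : List String), l.length ≤ f → l.length ≤ g →
    seqF f l = seqF g l := by
  intro f
  induction f with
  | zero =>
    intro g l hf hg
    have hl : l = [] := by cases l <;> simp_all
    subst hl; cases g <;> rfl
  | succ f ih =>
    intro g l hf hg
    cases l with
    | nil => cases g <;> rfl
    | cons t r =>
      cases g with
      | zero => simp at hg
      | succ g =>
        rw [seqF, seqF]
        have hp : parseB (f + 1) (t :: r) = parseB (g + 1) (t :: r) := parseB_fuel _ _ _ hf hg
        rw [← hp]
        cases h1 : parseB (f + 1) (t :: r) with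
        | none => rfl
        | some p =>
          obtain ⟨e, rest⟩ := p
          dsimp only [Option.bind]
          have hrest : rest.length < (t :: r).length := parseB_consumes _ _ _ _ h1
          have : seqF f rest = seqF g rest := by
            apply ih
            · simp at hf hrest ⊢; omega
            · simp at hg hrest ⊢; omega
          rw [this]

def S (l : List String) : Option (List String) := seqF l.length l

theorem S_cons (t : String) (r : List String) :
    S (t :: r) = (P (t :: r)).bind fun p => (S p.2).bind fun es => some (p.1 :: es) := by
  show seqF (r.length + 1) (t :: r) = _
  rw [seqF]
  show (parseB (r.length + 1) (t :: r)).bind _ = (P (t :: r)).bind _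
  have hP : P (t :: r) = parseB (r.length + 1) (t :: r) := rfl
  rw [hP]
  cases h1 : parseB (r.length + 1) (t :: r) with
  | none => rfl
  | some p =>
    obtain ⟨e, rest⟩ := p
    dsimp only [Option.bind]
    have hrest : rest.length < (t :: r).length := parseB_consumes _ _ _ _ h1
    have : seqF r.length rest = seqF rest.length rest := by
      apply seqF_fuel
      · simp at hrest ⊢; omega
      · omega
    rw [this]
    rfl

theorem P_nil_eq : P ([] : List String) = none := rfl

theorem S_some_ne_nil (t : String) (r : List String) (es : List String)
    (h : S (t :: r) = some es) : es ≠ [] := by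
  rw [S_cons] at h
  cases h1 : P (t :: r) with
  | none => rw [h1] at h; simp at h
  | some p =>
    rw [h1] at h
    dsimp only [Option.bind] at h
    cases h2 : S p.2 with
    | none => rw [h2] at h; simp at h
    | some es' =>
      rw [h2] at h
      simp at h
      rw [← h]
      simp

theorem S_cons_notop (t : String) (r : List String) (h : isOpB t = false) :
    S (t :: r) = (S r).map (t :: ·) := by
  rw [S_cons, P_cons, h]
  simp only [Bool.false_eq_true, if_false]
  dsimp only [Option.bind]
  cases h2 : S r <;> rfl

theorem S_cons_op (t : String) (r : List String) (h : isOpB t = true) :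
    S (t :: r) = (match S r with
      | some (a :: b :: es) => some (mkExpr t a b :: es)
      | _ => none) := by
  rw [S_cons, P_cons, h]
  simp only [if_true]
  cases h1 : P r with
  | none =>
    -- P r = none: r = [] (then S r = some []) or S r = none; RHS is none either way
    cases r with
    | nil => rfl
    | cons x xs =>
      rw [S_cons, h1]
      rfl
  | some p =>
    obtain ⟨a, r1⟩ := p
    have hr : r ≠ [] := by rintro rfl; rw [P_nil_eq] at h1; simp at h1
    obtain ⟨x, xs, rfl⟩ : ∃ x xs, r = x :: xs := by
      cases r with | nil => exact absurd rfl hr | cons x xs => exact ⟨x, xs, rfl⟩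
    rw [S_cons, h1]
    dsimp only [Option.bind]
    cases h2 : P r1 with
    | none =>
      cases r1 with
      | nil => rfl
      | cons y ys =>
        rw [S_cons, h2]
        rfl
    | some q =>
      obtain ⟨b, r2⟩ := q
      have hr1 : r1 ≠ [] := by rintro rfl; rw [P_nil_eq] at h2; simp at h2
      obtain ⟨y, ys, rfl⟩ : ∃ y ys, r1 = y :: ys := by
        cases r1 with | nil => exact absurd rfl hr1 | cons y ys => exact ⟨y, ys, rfl⟩
      rw [S_cons, h2]
      dsimp only [Option.bind]
      cases h3 : S r2 with
      | none => rfl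
      | some es => rfl



theorem isOp_agree (t : String) : (t ∈ opSetA) ↔ isOpB t = true := by
  simp [opSetA, isOpB, PySem.Set.mem_ofList]
  tauto

theorem sorted_pair (a b : String) :
    PySem.List.sorted [a, b] (fun x => x) false = if b < a then [b, a] else [a, b] := by
  split_ifs with hba
  · exact PySem.List.sorted_id_eq_of_perm_of_pairwise _ _ (List.Perm.swap a b [])
      (List.Pairwise.cons (fun y hy => by rcases List.mem_singleton.mp hy with rfl; exact le_of_lt hba)
        (List.pairwise_singleton _ _))
  · exact PySem.List.sorted_id_eq_of_perm_of_pairwise _ _ (List.Perm.refl _)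
      (List.Pairwise.cons (fun y hy => by rcases List.mem_singleton.mp hy with rfl; exact le_of_not_gt hba)
        (List.pairwise_singleton _ _))

theorem mkExpr_eq (t a b : String)
    (ab : List String)
    (hab : ab = if t = "+" ∨ t = "*" then PySem.List.sorted [a, b] (fun x => x) false else [a, b]) :
    wrapTok (ab.getD 0 a) ++ " " ++ t ++ " " ++ wrapTok (ab.getD 1 b) = mkExpr t a b := by
  subst hab
  unfold mkExpr
  by_cases hc : t = "+" ∨ t = "*"
  · rw [if_pos hc, sorted_pair]
    have hc' : (t == "+" || t == "*") = true := by
      rcases hc with h | h <;> subst h <;> simp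
    by_cases hba : b < a
    · rw [if_pos hba]
      simp [hc', hba]
    · rw [if_neg hba]
      simp [hc', hba]
  · have hc' : (t == "+" || t == "*") = false := by
      simp at hc ⊢; exact hc
    simp [hc, hc']

theorem stepA_eq (os : Option (List String)) (t : String) :
    stepA os t = os.bind fun stack =>
      if isOpB t then
        match stack with
        | a :: b :: rest => some (mkExpr t a b :: rest)
        | _ => none
      else some (t :: stack) := by
  cases os with
  | none => rfl
  | some stack =>
    dsimp only [stepA, Option.bind]
    by_cases hop : isOpB t
    · have hmem : t ∈ opSetA := (isOp_agree t).2 hop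
      rw [if_neg (by simpa using hmem), if_pos hop]
      cases stack with
      | nil => rw [if_pos (by simp)]
      | cons a s' =>
        cases s' with
        | nil => rw [if_pos (by simp)]
        | cons b rest =>
          rw [if_neg (by simp)]
          dsimp only
          rw [mkExpr_eq t a b _ rfl]
    · have hmem : ¬ (t ∈ opSetA) := fun h => hop ((isOp_agree t).1 h)
      rw [if_pos (by simpa using hmem), if_neg hop]

theorem main_invariant : ∀ (l : List String),
    l.reverse.foldl stepA (some []) = S l := by
  intro l
  induction l with
  | nil => rfl
  | cons t r ih =>
    rw [List.reverse_cons, List.foldl_append]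
    simp only [List.foldl_cons, List.foldl_nil]
    rw [ih, stepA_eq]
    by_cases hop : isOpB t
    · rw [S_cons_op t r hop]
      simp only [hop, if_true]
      cases hS : S r with
      | none => rfl
      | some es =>
        dsimp only [Option.bind]
        match es with
        | [] => rfl
        | [a] => rfl
        | a :: b :: es' => rfl
    · have hop' : isOpB t = false := by simpa using hop
      rw [S_cons_notop t r hop']
      simp only [hop', Bool.false_eq_true, if_false]
      cases hS : S r <;> rfl



theorem final_eq (l : List String) : from_prefix_to_infix l = from_prefix_to_infix_alt l := by
  unfold from_prefix_to_infix from_prefix_to_infix_alt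
  rw [main_invariant]
  show _ = (match P l with
    | none => none
    | some (expr, rest) => if rest.isEmpty then some expr else none)
  cases hP : P l with
  | none =>
    cases l with
    | nil => rfl
    | cons x xs =>
      rw [S_cons, hP]
      rfl
  | some p =>
    obtain ⟨e, rest⟩ := p
    have hl : l ≠ [] := by rintro rfl; rw [P_nil_eq] at hP; simp at hP
    obtain ⟨x, xs, rfl⟩ : ∃ x xs, l = x :: xs := by
      cases l with | nil => exact absurd rfl hl | cons x xs => exact ⟨x, xs, rfl⟩
    rw [S_cons, hP]
    dsimp only [Option.bind]
    cases rest with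
    | nil => rfl
    | cons y ys =>
      cases h2 : S (y :: ys) with
      | none => rfl
      | some es =>
        have hne : es ≠ [] := S_some_ne_nil y ys es h2
        obtain ⟨z, zs, rfl⟩ : ∃ z zs, es = z :: zs := by
          cases es with | nil => exact absurd rfl hne | cons z zs => exact ⟨z, zs, rfl⟩
        rfl

-- ===== VERDICT (by name: the statement is the Claim_ definition above) =====
theorem from_prefix_to_infix_spec : Claim_equal_from_prefix_to_infix := by
  intro prefix_ _
  unfold Spec_from_prefix_to_infix
  exact final_eq prefix_
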